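-- pv_equiv track=rewrite | github.com/lesh23/Practice | test_practice/Lv0.py | solution
-- ===== SOURCE A (Python) =====
-- def solution(hp):
--     result = 0
--     while hp >0:
--         if hp // 5 >= 1:
--             result += hp//5
--             hp =  hp% 5
--         elif hp // 3 >= 1:
--             result += hp //3
--             hp = hp % 3
--         else :
--             result += hp
--             hp = 0
--     return result
-- ===== SOURCE B (Python) =====
-- def solution(hp):
--     if hp <= 0:
--         return 0
--     return hp // 5 + (hp % 5) // 3 + (hp % 5) % 3
-- ===== Notes on version B (the rewrite author's own statement) =====
-- stated objective: simpler
-- what changed: Replaced the greedy while-loop with a closed-form expression hp//5 + (hp%5)//3 + (hp%5)%3 guarded by hp <= 0.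
import Mathlib
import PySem

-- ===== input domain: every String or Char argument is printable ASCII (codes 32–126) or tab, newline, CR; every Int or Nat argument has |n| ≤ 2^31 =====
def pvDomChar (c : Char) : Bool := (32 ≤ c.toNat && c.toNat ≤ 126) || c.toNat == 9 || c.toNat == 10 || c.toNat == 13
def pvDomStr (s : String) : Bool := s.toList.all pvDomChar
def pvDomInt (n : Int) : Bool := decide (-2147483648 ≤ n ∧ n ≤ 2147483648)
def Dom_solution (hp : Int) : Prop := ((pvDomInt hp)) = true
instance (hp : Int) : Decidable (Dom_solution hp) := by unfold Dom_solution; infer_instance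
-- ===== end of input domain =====

-- B replaces A's greedy while-loop by a closed-form expression (same value; same cost class).


-- ===== PORT A =====
-- loop of A: while hp > 0: …
def solutionLoop (hp result : Int) : Int :=
  if _h : hp > 0 then
    if PySem.Int.floordiv hp 5 ≥ 1 then
      solutionLoop (PySem.Int.mod hp 5) (result + PySem.Int.floordiv hp 5)
    else if PySem.Int.floordiv hp 3 ≥ 1 then
      solutionLoop (PySem.Int.mod hp 3) (result + PySem.Int.floordiv hp 3)
    else
      solutionLoop 0 (result + hp)
  else result
termination_by hp.toNat
decreasing_by
  · have h5 : PySem.Int.mod hp 5 = hp % 5 := PySem.Int.mod_eq_emod_of_pos (by omega)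
    have h5' : PySem.Int.floordiv hp 5 = hp / 5 := PySem.Int.floordiv_eq_ediv_of_pos (by omega)
    have := Int.emod_lt_of_pos hp (b := 5) (by omega)
    have := Int.emod_nonneg hp (b := 5) (by omega)
    omega
  · have h3 : PySem.Int.mod hp 3 = hp % 3 := PySem.Int.mod_eq_emod_of_pos (by omega)
    have h3' : PySem.Int.floordiv hp 3 = hp / 3 := PySem.Int.floordiv_eq_ediv_of_pos (by omega)
    have := Int.emod_lt_of_pos hp (b := 3) (by omega)
    have := Int.emod_nonneg hp (b := 3) (by omega)
    omega
  · omega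

def solution (hp : Int) : Int := solutionLoop hp 0

-- ===== PORT B =====
def solution_alt (hp : Int) : Int :=
  if hp ≤ 0 then 0
  else PySem.Int.floordiv hp 5 + PySem.Int.floordiv (PySem.Int.mod hp 5) 3
       + PySem.Int.mod (PySem.Int.mod hp 5) 3

-- ===== PRECONDITION & SPEC =====
def Spec_solution (hp : Int) (out : Int) : Prop := out = solution_alt hp
instance (hp : Int) (out : Int) : Decidable (Spec_solution hp out) := by unfold Spec_solution; infer_instance

-- ===== CLAIM (what is proved, stated in full; the proofs are below) =====
def Claim_equal_solution : Prop := ∀ (hp : Int), Dom_solution hp → Spec_solution hp (solution hp)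

-- ===== LEMMAS AND PROOFS =====

theorem alt_eq (hp : Int) :
    solution_alt hp = if hp ≤ 0 then 0 else hp / 5 + (hp % 5) / 3 + (hp % 5) % 3 := by
  unfold solution_alt
  by_cases h : hp ≤ 0
  · simp [h]
  · rw [PySem.Int.floordiv_eq_ediv_of_pos (a := hp) (b := 5) (by omega),
        PySem.Int.mod_eq_emod_of_pos (a := hp) (b := 5) (by omega),
        PySem.Int.floordiv_eq_ediv_of_pos (a := hp % 5) (b := 3) (by omega),
        PySem.Int.mod_eq_emod_of_pos (a := hp % 5) (b := 3) (by omega)]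

theorem solutionLoop_eq (hp result : Int) :
    solutionLoop hp result = result + solution_alt hp := by
  induction hp, result using solutionLoop.induct with
  | case1 hp result hpos h5 ih =>
      have e5 : PySem.Int.floordiv hp 5 = hp / 5 := PySem.Int.floordiv_eq_ediv_of_pos (by omega)
      have m5 : PySem.Int.mod hp 5 = hp % 5 := PySem.Int.mod_eq_emod_of_pos (by omega)
      rw [solutionLoop]
      simp only [hpos, dif_pos, h5, if_pos]
      rw [ih, alt_eq, alt_eq hp]
      have hlt := Int.emod_lt_of_pos hp (b := 5) (by omega)
      have hnn := Int.emod_nonneg hp (b := 5) (by omega)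
      have hge : 5 ≤ hp := by rw [e5] at h5; omega
      rw [e5, m5]
      split_ifs <;> omega
  | case2 hp result hpos h5 h3 ih =>
      have e5 : PySem.Int.floordiv hp 5 = hp / 5 := PySem.Int.floordiv_eq_ediv_of_pos (by omega)
      have e3 : PySem.Int.floordiv hp 3 = hp / 3 := PySem.Int.floordiv_eq_ediv_of_pos (by omega)
      have m3 : PySem.Int.mod hp 3 = hp % 3 := PySem.Int.mod_eq_emod_of_pos (by omega)
      rw [solutionLoop]
      simp only [hpos, dif_pos, h5, if_false, h3, if_pos]
      rw [ih, alt_eq, alt_eq hp]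
      have hlt3 := Int.emod_lt_of_pos hp (b := 3) (by omega)
      have hnn3 := Int.emod_nonneg hp (b := 3) (by omega)
      have hge3 : 3 ≤ hp := by rw [e3] at h3; omega
      have hlt5 : hp < 5 := by rw [e5] at h5; omega
      rw [e3, m3]
      split_ifs <;> omega
  | case3 hp result hpos h5 h3 ih =>
      have e5 : PySem.Int.floordiv hp 5 = hp / 5 := PySem.Int.floordiv_eq_ediv_of_pos (by omega)
      have e3 : PySem.Int.floordiv hp 3 = hp / 3 := PySem.Int.floordiv_eq_ediv_of_pos (by omega)
      rw [solutionLoop]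
      simp only [hpos, dif_pos, h5, h3, if_false]
      rw [ih, alt_eq, alt_eq hp]
      have hlt3 : hp < 3 := by rw [e3] at h3; omega
      split_ifs <;> omega
  | case4 hp result hpos =>
      rw [solutionLoop]
      simp only [hpos, dif_neg, not_false_iff]
      rw [alt_eq]
      have : hp ≤ 0 := by omega
      simp [this]

-- ===== VERDICT (by name: the statement is the Claim_ definition above) =====
theorem solution_spec : Claim_equal_solution := by
  intro hp _
  unfold Spec_solution solution
  rw [solutionLoop_eq]
  ring
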